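-- pv_equiv track=rewrite | github.com/daniel-reich/ubiquitous-fiesta | 9HWMgvjF7p3zhWBdk_9.py | keys_and_values
-- ===== SOURCE A (Python) =====
-- def keys_and_values(d):
--   re = []
--   re.append([])
--   re.append([])
--   for i in sorted(d):
--     re[0].append(i)
--     re[1].append(d[i])
--   return re
-- ===== SOURCE B (Python) =====
-- def keys_and_values(d):
--   # single pass: insert each (key, value) pair into a list kept sorted by key
--   pairs = []
--   for k, v in d.items():
--     i = 0
--     while i < len(pairs) and pairs[i][0] < k:
--       i += 1
--     pairs.insert(i, (k, v))
--   return [[p[0] for p in pairs], [p[1] for p in pairs]]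
-- ===== Notes on version B (the rewrite author's own statement) =====
-- stated objective: alternative
-- what changed: B replaces the library sort of the keys plus a per-key dict lookup by an insertion sort over the (key, value) pairs: one pass that inserts each pair into a list kept sorted by key, then splits it into the two columns.
import Mathlib
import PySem

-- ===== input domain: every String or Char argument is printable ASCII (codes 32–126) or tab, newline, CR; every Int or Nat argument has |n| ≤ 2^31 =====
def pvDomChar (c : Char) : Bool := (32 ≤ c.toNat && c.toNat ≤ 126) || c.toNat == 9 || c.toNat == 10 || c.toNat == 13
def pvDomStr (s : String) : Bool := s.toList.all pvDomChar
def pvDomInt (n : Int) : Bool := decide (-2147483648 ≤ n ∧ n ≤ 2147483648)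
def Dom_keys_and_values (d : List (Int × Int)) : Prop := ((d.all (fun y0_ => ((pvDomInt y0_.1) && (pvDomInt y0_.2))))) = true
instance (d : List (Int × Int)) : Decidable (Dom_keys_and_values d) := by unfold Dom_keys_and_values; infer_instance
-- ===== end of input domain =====

-- B replaces the library key sort + per-key dict lookup by a one-pass insertion
-- sort over the (key, value) pairs, split into two columns at the end (alternative).

-- ===== PORT A =====
-- for i in sorted(d): re[0].append(i); re[1].append(d[i])  — d[i] is first-match lookup
def keys_and_values (d : List (Int × Int)) : List (List Int) :=
  let re : List Int × List Int := ([], [])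
  let re := (PySem.List.sorted (d.map Prod.fst) (fun x => x)).foldl
    (fun re i => (re.1 ++ [i], re.2 ++ [(PySem.Dict.mk d).getD i 0])) re
  [re.1, re.2]

-- ===== PORT B =====
-- the index scan 'while i < len(pairs) and pairs[i][0] < k' followed by insert(i, (k, v)),
-- written as the structural recursion it performs
def insPair (p : Int × Int) : List (Int × Int) → List (Int × Int)
  | [] => [p]
  | q :: t => if q.1 < p.1 then q :: insPair p t else p :: q :: t

def keys_and_values_alt (d : List (Int × Int)) : List (List Int) :=
  let pairs := d.foldl (fun acc p => insPair p acc) []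
  [pairs.map Prod.fst, pairs.map Prod.snd]

-- ===== PRECONDITION & SPEC =====
-- Pre_ excludes only association lists with duplicate keys, which represent no
-- Python dict (the argument of A is a dict, whose keys are always distinct).
def Pre_keys_and_values (d : List (Int × Int)) : Prop := (d.map Prod.fst).Nodup
instance (d : List (Int × Int)) : Decidable (Pre_keys_and_values d) := by unfold Pre_keys_and_values; infer_instance
def pvWitness_keys_and_values : (List (Int × Int)) := [(3, 1), (1, 2), (2, 3)]
def Spec_keys_and_values (d : List (Int × Int)) (out : List (List Int)) : Prop := out = keys_and_values_alt d
instance (d : List (Int × Int)) (out : List (List Int)) : Decidable (Spec_keys_and_values d out) := by unfold Spec_keys_and_values; infer_instance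

-- ===== CLAIM (what is proved, stated in full; the proofs are below) =====
def Claim_equal_keys_and_values : Prop := ∀ (d : List (Int × Int)), Dom_keys_and_values d → Pre_keys_and_values d → Spec_keys_and_values d (keys_and_values d)

-- ===== LEMMAS AND PROOFS =====

-- A's loop: appending key and value at each step is appending the list and its map.
theorem foldl_two_append (l : List Int) (f : Int → Int) (a b : List Int) :
    l.foldl (fun re i => (re.1 ++ [i], re.2 ++ [f i])) (a, b) = (a ++ l, b ++ l.map f) := by
  induction l generalizing a b with
  | nil => simp
  | cons x t ih => simp [List.foldl_cons, ih]

-- first-match lookup of a present key in a duplicate-free association list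
theorem get?_mk_of_nodup (d : List (Int × Int)) (hnd : (d.map Prod.fst).Nodup) :
    ∀ p ∈ d, (PySem.Dict.mk d).get? p.1 = some p.2 := by
  induction d with
  | nil => intro p hp; simp at hp
  | cons q t ih =>
    intro p hp
    rw [show (q :: t) = ((q.1, q.2) :: t) from by simp, PySem.Dict.get?_mk_cons]
    simp only [List.map_cons, List.nodup_cons] at hnd
    rcases List.mem_cons.1 hp with rfl | hp
    · simp
    · have hne : ¬ (q.1 == p.1) = true := by
        simp only [beq_iff_eq]
        intro he
        exact hnd.1 (he ▸ List.mem_map_of_mem hp)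
      simp only [hne]
      exact ih hnd.2 p hp

theorem insPair_perm (p : Int × Int) (l : List (Int × Int)) : (insPair p l).Perm (p :: l) := by
  induction l with
  | nil => rfl
  | cons q t ih =>
    simp only [insPair]
    split
    · exact (ih.cons q).trans (List.Perm.swap p q t)
    · rfl

theorem foldl_insPair_perm (xs : List (Int × Int)) :
    ∀ acc, (xs.foldl (fun acc p => insPair p acc) acc).Perm (xs ++ acc) := by
  induction xs with
  | nil => intro acc; simp
  | cons x t ih =>
    intro acc
    simp only [List.foldl_cons, List.cons_append]
    refine (ih _).trans ?_
    refine ((insPair_perm x acc).append_left t).trans ?_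
    exact List.perm_middle

theorem insPair_sorted (p : Int × Int) (l : List (Int × Int))
    (h : l.Pairwise (fun a b => a.1 ≤ b.1)) :
    (insPair p l).Pairwise (fun a b => a.1 ≤ b.1) := by
  induction l with
  | nil => exact List.pairwise_singleton _ p
  | cons q t ih =>
    simp only [insPair]
    rcases List.pairwise_cons.1 h with ⟨hq, ht⟩
    split
    · rename_i hlt
      refine List.pairwise_cons.2 ⟨?_, ih ht⟩
      intro y hy
      rcases List.mem_cons.1 ((insPair_perm p t).mem_iff.1 hy) with rfl | hy'
      · omega
      · exact hq y hy'
    · rename_i hge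
      refine List.pairwise_cons.2 ⟨?_, h⟩
      intro y hy
      rcases List.mem_cons.1 hy with rfl | hy
      · omega
      · have := hq y hy; omega

theorem foldl_insPair_sorted (xs : List (Int × Int)) :
    ∀ acc, acc.Pairwise (fun a b => a.1 ≤ b.1) →
    (xs.foldl (fun acc p => insPair p acc) acc).Pairwise (fun a b => a.1 ≤ b.1) := by
  induction xs with
  | nil => intro acc h; exact h
  | cons x t ih =>
    intro acc h
    exact ih _ (insPair_sorted x acc h)

theorem keys_and_values_spec : Claim_equal_keys_and_values := by
  intro d _ hpre
  unfold Spec_keys_and_values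
  simp only [keys_and_values, keys_and_values_alt]
  set Q := d.foldl (fun acc p => insPair p acc) [] with hQ
  have hperm : Q.Perm d := by
    simpa using foldl_insPair_perm d []
  have hndQ : (Q.map Prod.fst).Nodup := ((hperm.map Prod.fst).nodup_iff).2 hpre
  have hle : Q.Pairwise (fun a b => a.1 ≤ b.1) := foldl_insPair_sorted d [] (by simp)
  have hlt : Q.Pairwise (fun a b => a.1 < b.1) := by
    have h2 : Q.Pairwise (fun a b => a.1 ≠ b.1) := (List.pairwise_map).1 hndQ
    exact (hle.and h2).imp (fun h => lt_of_le_of_ne h.1 h.2)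
  have hS : PySem.List.sorted (d.map Prod.fst) (fun x => x) = Q.map Prod.fst := by
    apply PySem.List.sorted_eq_of_perm_of_pairwise_lt
    · exact hperm.map Prod.fst
    · exact (List.pairwise_map).2 hlt
  rw [hS, foldl_two_append]
  have hval : (Q.map Prod.fst).map (fun i => (PySem.Dict.mk d).getD i 0) = Q.map Prod.snd := by
    rw [List.map_map]
    apply List.map_congr_left
    intro p hp
    have hpd : p ∈ d := hperm.mem_iff.1 hp
    simp [Function.comp, PySem.Dict.getD, get?_mk_of_nodup d hpre p hpd]
  simp [hval]
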